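-- pv_equiv track=rewrite | github.com/LaiXuanHieu/C-u-Tr-c-D-Li-u | Chuong5/5.14.py | find_min_number
-- ===== SOURCE A (Python) =====
-- def find_min_number(pattern):
--     stack = []
--     result = ""
--     num = 1
--
--     for char in pattern:
--         stack.append(num)
--         num += 1
--         if char == 'I':
--             while stack:
--                 result += str(stack.pop())
--
--     stack.append(num)
--     while stack:
--         result += str(stack.pop())
--
--     return result
-- ===== SOURCE B (Python) =====
-- def find_min_number(pattern):
--     # Emit one descending run of consecutive numbers per maximal block ending
--     # at each 'I' (and at the end), instead of simulating a push/pop stack.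
--     parts = []
--     start = 1
--     d = 0
--     for ch in pattern:
--         if ch == 'I':
--             parts.extend(str(x) for x in range(start + d, start - 1, -1))
--             start += d + 1
--             d = 0
--         else:
--             d += 1
--     parts.extend(str(x) for x in range(start + d, start - 1, -1))
--     return ''.join(parts)
-- ===== Notes on version B (the rewrite author's own statement) =====
-- stated objective: alternative
-- what changed: Replaces A's push/pop stack simulation (pushing every number and flushing the stack on each 'I' and at the end) by a run-length scan that counts each maximal non-'I' block and emits the corresponding descending range of consecutive numbers directly via range(start+d, start-1, -1).
import Mathlib
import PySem

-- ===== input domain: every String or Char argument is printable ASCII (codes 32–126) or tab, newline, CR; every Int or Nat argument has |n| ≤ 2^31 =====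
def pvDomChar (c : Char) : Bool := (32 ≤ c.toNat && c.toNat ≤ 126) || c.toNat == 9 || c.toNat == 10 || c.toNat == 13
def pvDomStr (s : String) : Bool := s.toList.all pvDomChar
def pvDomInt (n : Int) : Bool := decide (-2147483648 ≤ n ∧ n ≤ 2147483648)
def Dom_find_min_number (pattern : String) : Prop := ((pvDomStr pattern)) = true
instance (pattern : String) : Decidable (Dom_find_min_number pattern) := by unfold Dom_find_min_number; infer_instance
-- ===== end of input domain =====

-- B replaces A's push/pop stack simulation by a run-length scan that emits one
-- descending range of consecutive numbers per maximal non-'I' block (objective: alternative).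

-- ===== PORT A =====
-- 'while stack: result += str(stack.pop())' — pop from the end = walk the reversed stack
def pvDrain : List Int → List Char → List Char
  | [], res => res
  | x :: rest, res => pvDrain rest (res ++ PySem.Int.toChars x)

-- one iteration of A's for-loop: push num, num += 1, flush on 'I'
def pvStepA (st : List Int × List Char × Int) (c : Char) : List Int × List Char × Int :=
  let stack := st.1 ++ [st.2.2]
  let num := st.2.2 + 1
  if c = 'I' then ([], pvDrain stack.reverse st.2.1, num) else (stack, st.2.1, num)

def find_min_number (pattern : String) : String :=
  let st := pattern.toList.foldl pvStepA ([], [], 1)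
  String.ofList (pvDrain (st.1 ++ [st.2.2]).reverse st.2.1)

-- ===== PORT B =====
-- str(x) for x in range(start + d, start - 1, -1)
def pvEmit (start d : Int) : List (List Char) :=
  (PySem.List.pyRange (start + d) (start - 1) (-1)).map PySem.Int.toChars

-- one iteration of B's for-loop: state (parts, start, d)
def pvStepB (st : List (List Char) × Int × Int) (ch : Char) : List (List Char) × Int × Int :=
  if ch = 'I' then (st.1 ++ pvEmit st.2.1 st.2.2, st.2.1 + st.2.2 + 1, 0)
  else (st.1, st.2.1, st.2.2 + 1)

def find_min_number_alt (pattern : String) : String :=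
  let st := pattern.toList.foldl pvStepB ([], 1, 0)
  String.ofList (PySem.Chars.join [] (st.1 ++ pvEmit st.2.1 st.2.2))

-- ===== PRECONDITION & SPEC =====
def Spec_find_min_number (pattern : String) (out : String) : Prop := out = find_min_number_alt pattern
instance (pattern : String) (out : String) : Decidable (Spec_find_min_number pattern out) := by unfold Spec_find_min_number; infer_instance

-- ===== CLAIM (what is proved, stated in full; the proofs are below) =====
def Claim_equal_find_min_number : Prop := ∀ (pattern : String), Dom_find_min_number pattern → Spec_find_min_number pattern (find_min_number pattern)

-- ===== LEMMAS AND PROOFS =====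

lemma pvDrain_eq (l : List Int) (res : List Char) :
    pvDrain l res = res ++ (l.map PySem.Int.toChars).flatten := by
  induction l generalizing res with
  | nil => simp [pvDrain]
  | cons x t ih => simp [pvDrain, ih]

lemma pvJoin_nil_eq_flatten (l : List (List Char)) :
    PySem.Chars.join [] l = l.flatten := by
  induction l with
  | nil => simp [PySem.Chars.join_nil]
  | cons p t ih =>
    cases t with
    | nil => simp [PySem.Chars.join_singleton]
    | cons q r =>
      rw [PySem.Chars.join_cons_cons]
      simp [ih]

-- the A-stack [start..start+d] extended by its next number is the next range
lemma pvRange_snoc (start : Int) (d : Nat) :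
    PySem.List.pyRange start (start + d) 1 ++ [start + d]
      = PySem.List.pyRange start (start + d + 1) 1 := by
  have h : start ≤ start + (d : Int) := by omega
  exact (PySem.List.pyRange_one_succ_right h).symm

-- reversed ascending stack = B's descending emission range
lemma pvRange_rev (start : Int) (d : Nat) :
    (PySem.List.pyRange start (start + d + 1) 1).reverse
      = PySem.List.pyRange (start + d) (start - 1) (-1) := by
  rw [PySem.List.pyRange_neg_one_eq_reverse]
  norm_num

-- main invariant: A's fold from stack [start..start+d) of the pending run agrees
-- with B's fold from (parts, start, d), where A's result so far is parts.flatten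
lemma pvMain (cs : List Char) (parts : List (List Char)) (start : Int) (d : Nat) :
    (let sA := cs.foldl pvStepA
        (PySem.List.pyRange start (start + d) 1, parts.flatten, start + d)
     pvDrain (sA.1 ++ [sA.2.2]).reverse sA.2.1)
  = (let sB := cs.foldl pvStepB (parts, start, (d : Int))
     (sB.1 ++ pvEmit sB.2.1 sB.2.2).flatten) := by
  induction cs generalizing parts start d with
  | nil =>
    simp only [List.foldl_nil]
    rw [pvRange_snoc, pvRange_rev, pvDrain_eq]
    simp [pvEmit]
  | cons c t ih =>
    simp only [List.foldl_cons]
    by_cases hc : c = 'I'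
    · have hA : pvStepA (PySem.List.pyRange start (start + d) 1, parts.flatten, start + (d : Int)) c
          = (PySem.List.pyRange (start + d + 1) (start + d + 1 + ((0 : Nat) : Int)) 1,
             (parts ++ pvEmit start (d : Int)).flatten,
             start + d + 1 + ((0 : Nat) : Int)) := by
        simp only [pvStepA, hc]
        rw [pvRange_snoc, pvRange_rev, pvDrain_eq]
        simp [pvEmit]
      have hB : pvStepB (parts, start, (d : Int)) c
          = (parts ++ pvEmit start (d : Int), start + d + 1, ((0 : Nat) : Int)) := by
        simp [pvStepB, hc]
      rw [hA, hB]
      exact ih (parts ++ pvEmit start (d : Int)) (start + d + 1) 0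
    · have hA : pvStepA (PySem.List.pyRange start (start + d) 1, parts.flatten, start + (d : Int)) c
          = (PySem.List.pyRange start (start + ((d + 1 : Nat) : Int)) 1, parts.flatten,
             start + ((d + 1 : Nat) : Int)) := by
        simp only [pvStepA, hc]
        rw [pvRange_snoc]
        push_cast
        ring_nf
      have hB : pvStepB (parts, start, (d : Int)) c
          = (parts, start, ((d + 1 : Nat) : Int)) := by
        simp [pvStepB, hc]
      rw [hA, hB]
      exact ih parts start (d + 1)

-- ===== VERDICT (by name: the statement is the Claim_ definition above) =====
theorem find_min_number_spec : Claim_equal_find_min_number := by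
  intro pattern _
  unfold Spec_find_min_number find_min_number find_min_number_alt
  have h := pvMain pattern.toList [] 1 0
  simp only [Nat.cast_zero, add_zero, List.flatten_nil] at h
  rw [PySem.List.pyRange_one_eq_nil (le_refl 1)] at h
  exact congrArg String.ofList (h.trans (pvJoin_nil_eq_flatten _).symm)
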